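-- pv_equiv track=rewrite | github.com/csshlok/4994-Research-Project | extraction.py | apply_negation
-- ===== SOURCE A (Python) =====
-- from typing import List, Iterable, Dict, Any
--
-- NEGATORS = {"no","not","never","without","hardly","rarely","scarcely","barely","seldom"}
--
-- NEG_WINDOW = 3
--
-- def apply_negation(tokens: List[str], window: int = NEG_WINDOW) -> List[str]:
--     """Append _NEG to the next `window` content tokens after a negator."""
--     out = []
--     i = 0
--     while i < len(tokens):
--         tok = tokens[i]
--         out.append(tok)
--         if tok in NEGATORS:
--             k = 0
--             j = i + 1
--             while j < len(tokens) and k < window: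
--                 nxt = tokens[j]
--                 if nxt not in {"<url>","<email>"} and nxt not in NEGATORS:
--                     out.append(f"{nxt}_NEG")
--                     j += 1
--                     k += 1
--                 else:
--                     out.append(nxt)
--                     j += 1
--             i = j
--         else:
--             i += 1
--     return out
-- ===== SOURCE B (Python) =====
-- NEGATORS = {"no","not","never","without","hardly","rarely","scarcely","barely","seldom"}
--
-- NEG_WINDOW = 3
--
-- def apply_negation(tokens, window=NEG_WINDOW):
--     """Single left-to-right pass with a countdown of remaining tokens to mark."""
--     out = []
--     count = 0
--     for tok in tokens:
--         if count > 0: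
--             if tok in {"<url>", "<email>"} or tok in NEGATORS:
--                 out.append(tok)
--             else:
--                 out.append(tok + "_NEG")
--                 count -= 1
--         else:
--             out.append(tok)
--             if tok in NEGATORS:
--                 count = window
--     return out
-- ===== Notes on version B (the rewrite author's own statement) =====
-- stated objective: simpler
-- what changed: Replaced the nested while-loops with index/pointer jumps by a single for-loop over the tokens holding an integer countdown of remaining tokens to mark.
import Mathlib
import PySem

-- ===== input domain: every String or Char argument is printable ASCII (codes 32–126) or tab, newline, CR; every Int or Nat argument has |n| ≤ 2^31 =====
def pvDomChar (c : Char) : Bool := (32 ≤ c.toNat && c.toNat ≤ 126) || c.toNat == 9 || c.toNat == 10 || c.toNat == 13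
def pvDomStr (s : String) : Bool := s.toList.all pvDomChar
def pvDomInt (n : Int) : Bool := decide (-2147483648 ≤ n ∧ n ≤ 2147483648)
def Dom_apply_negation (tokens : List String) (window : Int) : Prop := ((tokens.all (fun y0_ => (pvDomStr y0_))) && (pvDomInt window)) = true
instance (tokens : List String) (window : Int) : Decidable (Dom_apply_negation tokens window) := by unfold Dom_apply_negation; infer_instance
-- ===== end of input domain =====

-- B replaces A's nested while-loops and pointer jumps by one pass with a countdown state (objective: simpler).

-- ===== PORT A =====
-- the module-level set NEGATORS: only used for membership tests, so a list of its distinct elements is exact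
def NEGATORS : List String := ["no","not","never","without","hardly","rarely","scarcely","barely","seldom"]

-- inner while loop of A: `while j < len(tokens) and k < window: ...`; returns (j, out)
def innerA (tokens : List String) (window : Int) (j : Nat) (k : Int) (out : List String) : Nat × List String :=
  if h : j < tokens.length then
    if k < window then
      let nxt := tokens[j]
      if nxt ∉ ["<url>", "<email>"] ∧ nxt ∉ NEGATORS then
        innerA tokens window (j+1) (k+1) (out ++ [nxt ++ "_NEG"])
      else
        innerA tokens window (j+1) k (out ++ [nxt])
    else (j, out)
  else (j, out)
termination_by tokens.length - j
decreasing_by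
  · exact Nat.sub_succ_lt_self _ _ h
  · exact Nat.sub_succ_lt_self _ _ h

-- termination lemma the outer loop needs: the inner loop never moves j backwards
theorem innerA_fst_ge (tokens : List String) (window : Int) (j : Nat) (k : Int) (out : List String) :
    j ≤ (innerA tokens window j k out).1 := by
  fun_induction innerA
  all_goals first
    | exact Nat.le_refl _
    | exact Nat.le_of_succ_le (by assumption)

-- outer while loop of A
def outerA (tokens : List String) (window : Int) (i : Nat) (out : List String) : List String :=
  if h : i < tokens.length then
    let tok := tokens[i]
    if tok ∈ NEGATORS then
      let r := innerA tokens window (i+1) 0 (out ++ [tok])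
      outerA tokens window r.1 r.2
    else outerA tokens window (i+1) (out ++ [tok])
  else out
termination_by tokens.length - i
decreasing_by
  · exact Nat.lt_of_le_of_lt
      (Nat.sub_le_sub_left (innerA_fst_ge tokens window (i+1) 0 (out ++ [tokens[i]])) tokens.length)
      (Nat.sub_succ_lt_self _ _ h)
  · exact Nat.sub_succ_lt_self _ _ h

def apply_negation (tokens : List String) (window : Int) : List String :=
  outerA tokens window 0 []

-- ===== PORT B =====
-- one step of B's for-loop: state is (out, count)
def stepB (window : Int) (st : List String × Int) (tok : String) : List String × Int :=
  if st.2 > 0 then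
    if tok ∈ ["<url>", "<email>"] ∨ tok ∈ NEGATORS then (st.1 ++ [tok], st.2)
    else (st.1 ++ [tok ++ "_NEG"], st.2 - 1)
  else
    (st.1 ++ [tok], if tok ∈ NEGATORS then window else 0)

def apply_negation_alt (tokens : List String) (window : Int) : List String :=
  (tokens.foldl (stepB window) ([], 0)).1

-- ===== PRECONDITION & SPEC =====
def Spec_apply_negation (tokens : List String) (window : Int) (out : List String) : Prop := out = apply_negation_alt tokens window
instance (tokens : List String) (window : Int) (out : List String) : Decidable (Spec_apply_negation tokens window out) := by unfold Spec_apply_negation; infer_instance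

-- ===== CLAIM (what is proved, stated in full; the proofs are below) =====
def Claim_equal_apply_negation : Prop := ∀ (tokens : List String) (window : Int), Dom_apply_negation tokens window → Spec_apply_negation tokens window (apply_negation tokens window)

-- ===== LEMMAS AND PROOFS =====

-- B's loop, rewritten as structural recursion on the token list (proof vehicle)
def goB (window : Int) : List String → Int → List String → List String
  | [], _, out => out
  | tok :: rest, count, out =>
    if count > 0 then
      if tok ∈ ["<url>", "<email>"] ∨ tok ∈ NEGATORS then goB window rest count (out ++ [tok])
      else goB window rest (count - 1) (out ++ [tok ++ "_NEG"])
    else goB window rest (if tok ∈ NEGATORS then window else 0) (out ++ [tok])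

theorem foldl_stepB_eq_goB (window : Int) (rest : List String) :
    ∀ out count, (rest.foldl (stepB window) (out, count)).1 = goB window rest count out := by
  induction rest with
  | nil => intro out count; simp [goB]
  | cons tok rest ih =>
    intro out count
    simp only [List.foldl_cons, stepB, goB]
    split_ifs <;> simp [ih]

-- a non-positive countdown behaves exactly like a zero countdown
theorem goB_nonpos (window : Int) (rest : List String) :
    ∀ out c d, c ≤ 0 → d ≤ 0 → goB window rest c out = goB window rest d out := by
  induction rest with
  | nil => intro out c d _ _; rfl
  | cons tok rest ih =>
    intro out c d hc hd
    simp only [goB, if_neg (by omega : ¬ c > 0), if_neg (by omega : ¬ d > 0)]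

-- main simulation: A's two nested loops compute goB; proved by strong induction on remaining length
theorem mainAux (tokens : List String) (window : Int) :
    ∀ n : Nat,
      (∀ i out, tokens.length - i = n →
        outerA tokens window i out = goB window (tokens.drop i) 0 out)
      ∧ (∀ j k out, tokens.length - j = n → k < window →
          outerA tokens window (innerA tokens window j k out).1 (innerA tokens window j k out).2
            = goB window (tokens.drop j) (window - k) out) := by
  intro n
  induction n using Nat.strong_induction_on with
  | _ n IH =>
    constructor
    · intro i out hn
      by_cases hi : i < tokens.length
      · rw [outerA, dif_pos hi, List.drop_eq_getElem_cons hi]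
        by_cases hneg : tokens[i] ∈ NEGATORS
        · simp only [if_pos hneg, goB]
          by_cases hw : (0:Int) < window
          · have := (IH (tokens.length - (i+1)) (by omega)).2 (i+1) 0 (out ++ [tokens[i]]) rfl hw
            simpa using this
          · -- window ≤ 0: inner loop exits at once
            rw [innerA]
            by_cases hj : i + 1 < tokens.length
            · rw [dif_pos hj, if_neg (by omega : ¬ (0:Int) < window)]
              rw [(IH (tokens.length - (i+1)) (by omega)).1 (i+1) (out ++ [tokens[i]]) rfl,
                if_neg (by omega : ¬ (0:Int) > 0)]
              exact goB_nonpos window _ _ 0 window (by omega) (by omega)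
            · rw [dif_neg hj]
              rw [(IH (tokens.length - (i+1)) (by omega)).1 (i+1) (out ++ [tokens[i]]) rfl,
                if_neg (by omega : ¬ (0:Int) > 0)]
              exact goB_nonpos window _ _ 0 window (by omega) (by omega)
        · rw [if_neg hneg,
            (IH (tokens.length - (i+1)) (by omega)).1 (i+1) (out ++ [tokens[i]]) rfl, goB,
            if_neg (by omega : ¬ (0:Int) > 0), if_neg hneg]
      · rw [outerA, dif_neg hi, List.drop_of_length_le (by omega), goB]
    · intro j k out hn hk
      by_cases hj : j < tokens.length
      · rw [innerA, dif_pos hj, if_pos hk, List.drop_eq_getElem_cons hj]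
        have hcnt : window - k > 0 := by omega
        by_cases hmem : tokens[j] ∉ ["<url>", "<email>"] ∧ tokens[j] ∉ NEGATORS
        · rw [if_pos hmem]
          simp only [goB, if_pos hcnt,
            if_neg (by rcases hmem with ⟨h1, h2⟩; simp [h1, h2] : ¬ (tokens[j] ∈ ["<url>", "<email>"] ∨ tokens[j] ∈ NEGATORS))]
          have harith : window - k - 1 = window - (k + 1) := by ring
          rw [harith]
          by_cases hk1 : k + 1 < window
          · exact (IH (tokens.length - (j+1)) (by omega)).2 (j+1) (k+1) (out ++ [tokens[j] ++ "_NEG"]) rfl hk1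
          · have hkw : k + 1 = window := by omega
            rw [innerA]
            by_cases hj1 : j + 1 < tokens.length
            · rw [dif_pos hj1, if_neg (by omega : ¬ k + 1 < window)]
              rw [(IH (tokens.length - (j+1)) (by omega)).1 (j+1) (out ++ [tokens[j] ++ "_NEG"]) rfl]
              rw [hkw]; simp
            · rw [dif_neg hj1]
              rw [(IH (tokens.length - (j+1)) (by omega)).1 (j+1) (out ++ [tokens[j] ++ "_NEG"]) rfl]
              rw [hkw]; simp
        · rw [if_neg hmem]
          have hmem' : tokens[j] ∈ ["<url>", "<email>"] ∨ tokens[j] ∈ NEGATORS := by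
            by_contra hc; push Not at hc; exact hmem ⟨hc.1, hc.2⟩
          simp only [goB, if_pos hcnt, if_pos hmem']
          exact (IH (tokens.length - (j+1)) (by omega)).2 (j+1) k (out ++ [tokens[j]]) rfl hk
      · rw [innerA, dif_neg hj, List.drop_of_length_le (by omega), goB]
        rw [outerA, dif_neg hj]

-- ===== VERDICT (by name: the statement is the Claim_ definition above) =====
theorem apply_negation_spec : Claim_equal_apply_negation := by
  intro tokens window _
  unfold Spec_apply_negation apply_negation apply_negation_alt
  rw [foldl_stepB_eq_goB]
  have := (mainAux tokens window (tokens.length - 0)).1 0 [] rfl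
  simpa using this
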